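-- pv_equiv track=rewrite | github.com/sunsetsobserver/chain-of-thoughts | chain_of_thoughts_8.py | make_meter_arrays
-- ===== SOURCE A (Python) =====
-- from typing import Dict, List, Tuple
--
-- def _meter_at_time(t: int) -> Tuple[int, int]:
--     if t < 12:      return 3, 4   # bar 1
--     elif t < 20:    return 2, 4   # bar 2
--     elif t < 36:    return 4, 4   # bar 3
--     elif t < 48:    return 3, 4   # bar 4
--     elif t < 64:    return 4, 4   # bar 5
--     elif t < 80:    return 4, 4   # bar 6
--     elif t < 92:    return 3, 4   # bar 7
--     elif t < 104:   return 3, 4   # bar 8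
--     elif t < 116:   return 3, 4   # bar 9
--     elif t < 128:   return 3, 4   # bar 10
--     elif t < 140:   return 3, 4   # bar 11
--     elif t < 152:   return 3, 4   # bar 12
--     elif t < 164:   return 3, 4   # bar 13
--     elif t < 176:   return 3, 4   # bar 14
--     elif t < 184:   return 2, 4   # bar 15
--     elif t < 200:   return 4, 4   # bar 16
--     elif t < 216:   return 4, 4   # bar 17
--     elif t < 232:   return 4, 4   # bar 18
--     elif t < 236:   return 1, 4   # bar 19 (recap hit)
--     elif t < 240:   return 1, 4   # bar 20 (short break)
--     elif t < 256:   return 4, 4   # bar 21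
--     elif t < 272:   return 4, 4   # bar 22
--     elif t < 288:   return 4, 4   # bar 23
--     elif t < 304:   return 4, 4   # bar 24
--     elif t < 320:   return 4, 4   # bar 25
--     elif t < 336:   return 4, 4   # bar 26
--     elif t < 352:   return 4, 4   # bar 27
--     elif t < 368:   return 4, 4   # bar 28
--     elif t < 384:   return 4, 4   # bar 29
--     elif t < 400:   return 4, 4   # bar 30
--     elif t < 416:   return 4, 4   # bar 31
--     elif t < 432:   return 4, 4   # bar 32
--     elif t < 448:   return 4, 4   # bar 33
--     elif t < 464:   return 4, 4   # bar 34
--     else:           return 4, 4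
--
-- def make_meter_arrays(N: int, abs_times: List[int]) -> Tuple[List[int], List[int]]:
--     """Map each onset time to its bar's meter."""
--     nums, dens = [], []
--     for t in abs_times:
--         n, d = _meter_at_time(t)
--         nums.append(n); dens.append(d)
--     if len(nums) != N:
--         nums = (nums + [nums[-1]]*N)[:N]
--         dens = (dens + [4]*N)[:N]
--     return nums, dens
-- ===== SOURCE B (Python) =====
-- # Strict upper thresholds of each bar; _NUMTAB[j] is the numerator for the j-th
-- # slot, with one extra trailing entry for times past the last boundary.
-- _BOUNDS = [12, 20, 36, 48, 64, 80, 92, 104, 116, 128, 140, 152, 164, 176,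
--            184, 200, 216, 232, 236, 240, 256, 272, 288, 304, 320, 336, 352,
--            368, 384, 400, 416, 432, 448, 464]
-- _NUMTAB = [3, 2, 4, 3, 4, 4, 3, 3, 3, 3, 3, 3, 3, 3,
--            2, 4, 4, 4, 1, 1, 4, 4, 4, 4, 4, 4, 4,
--            4, 4, 4, 4, 4, 4, 4, 4]
--
--
-- def make_meter_arrays(N, abs_times):
--     """Map each onset time to its bar's meter.
--
--     Sort the onsets (keeping their positions), then merge the sorted onsets
--     with the sorted boundary table in ONE forward pass of a single pointer j
--     (never rewound), scattering each numerator back to its position.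
--     """
--     order = sorted(enumerate(abs_times), key=lambda p: p[1])
--     nums = [0] * len(abs_times)
--     j = 0
--     for i, t in order:
--         while j < len(_BOUNDS) and _BOUNDS[j] <= t:
--             j += 1
--         nums[i] = _NUMTAB[j]
--     dens = [4] * len(abs_times)
--     if len(nums) != N:
--         pad = nums[-1]
--         nums = nums[:N] + [pad] * (N - len(nums))
--         dens = dens[:N] + [4] * (N - len(dens))
--     return nums, dens
-- ===== Notes on version B (the rewrite author's own statement) =====
-- stated objective: alternative
-- what changed: B sorts the onsets with their positions and computes all numerators in one merged sweep of a single never-rewound pointer over the sorted boundary table, scattering results back by index, instead of A's per-element 35-way if/elif chain; the padding is split into an explicit truncate-then-extend.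
import Mathlib
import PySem

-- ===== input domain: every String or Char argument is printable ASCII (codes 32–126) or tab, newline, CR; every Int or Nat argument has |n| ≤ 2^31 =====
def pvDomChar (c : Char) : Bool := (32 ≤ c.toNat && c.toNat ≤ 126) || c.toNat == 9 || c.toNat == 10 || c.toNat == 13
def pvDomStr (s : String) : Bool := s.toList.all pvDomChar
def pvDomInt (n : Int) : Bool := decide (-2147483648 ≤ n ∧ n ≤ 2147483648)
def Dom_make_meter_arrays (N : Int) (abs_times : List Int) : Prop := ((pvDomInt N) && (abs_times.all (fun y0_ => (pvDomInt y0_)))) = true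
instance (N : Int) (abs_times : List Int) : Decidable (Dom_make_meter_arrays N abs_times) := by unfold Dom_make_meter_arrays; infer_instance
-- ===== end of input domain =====

-- B replaces A's per-element 35-way if/elif chain by a sort-and-merge: sort the
-- onsets with their positions, sweep ONCE over the boundary table with a single
-- never-rewound pointer, and scatter numerators back by position (objective: alternative).

-- ===== PORT A =====
def meter_at_time (t : Int) : Int × Int :=
  if t < 12 then (3, 4) else
  if t < 20 then (2, 4) else
  if t < 36 then (4, 4) else
  if t < 48 then (3, 4) else
  if t < 64 then (4, 4) else
  if t < 80 then (4, 4) else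
  if t < 92 then (3, 4) else
  if t < 104 then (3, 4) else
  if t < 116 then (3, 4) else
  if t < 128 then (3, 4) else
  if t < 140 then (3, 4) else
  if t < 152 then (3, 4) else
  if t < 164 then (3, 4) else
  if t < 176 then (3, 4) else
  if t < 184 then (2, 4) else
  if t < 200 then (4, 4) else
  if t < 216 then (4, 4) else
  if t < 232 then (4, 4) else
  if t < 236 then (1, 4) else
  if t < 240 then (1, 4) else
  if t < 256 then (4, 4) else
  if t < 272 then (4, 4) else
  if t < 288 then (4, 4) else
  if t < 304 then (4, 4) else
  if t < 320 then (4, 4) else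
  if t < 336 then (4, 4) else
  if t < 352 then (4, 4) else
  if t < 368 then (4, 4) else
  if t < 384 then (4, 4) else
  if t < 400 then (4, 4) else
  if t < 416 then (4, 4) else
  if t < 432 then (4, 4) else
  if t < 448 then (4, 4) else
  if t < 464 then (4, 4) else
  (4, 4)

def make_meter_arrays (N : Int) (abs_times : List Int) : List Int × List Int :=
  let st := abs_times.foldl
    (fun (st : List Int × List Int) t => (st.1 ++ [(meter_at_time t).1], st.2 ++ [(meter_at_time t).2]))
    ([], [])
  let nums := st.1
  let dens := st.2
  if (nums.length : Int) ≠ N then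
    (PySem.List.slice (nums ++ List.replicate N.toNat (PySem.List.pyGetD nums (-1) 0)) none (some N),
     PySem.List.slice (dens ++ List.replicate N.toNat 4) none (some N))
  else (nums, dens)

-- ===== PORT B =====
def metersBounds : List Int := [12, 20, 36, 48, 64, 80, 92, 104, 116, 128, 140, 152, 164, 176, 184, 200, 216, 232, 236, 240, 256, 272, 288, 304, 320, 336, 352, 368, 384, 400, 416, 432, 448, 464]

def metersNums : List Int := [3, 2, 4, 3, 4, 4, 3, 3, 3, 3, 3, 3, 3, 3, 2, 4, 4, 4, 1, 1, 4, 4, 4, 4, 4, 4, 4, 4, 4, 4, 4, 4, 4, 4, 4]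

-- the while loop 'while j < len(_BOUNDS) and _BOUNDS[j] <= t: j += 1' advances j
-- over exactly the unscanned boundaries ≤ t (exact: takeWhile stops where the loop stops)
def advanceJ (j : Nat) (t : Int) : Nat :=
  j + ((metersBounds.drop j).takeWhile (fun b => b ≤ t)).length

-- the for loop over the sorted (index, time) pairs, carrying the pointer j and
-- the nums array; 'nums[i] = _NUMTAB[j]' with i a nonnegative enumerate index (so .toNat is exact)
def loopB : List (Int × Int) → Nat → List Int → List Int
  | [], _, arr => arr
  | (i, t) :: ps, j, arr =>
      let j' := advanceJ j t
      loopB ps j' (arr.set i.toNat (PySem.List.pyGetD metersNums (j' : Int) 0))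

def make_meter_arrays_alt (N : Int) (abs_times : List Int) : List Int × List Int :=
  let order := PySem.List.sorted (PySem.List.enumerate abs_times) (fun p => p.2) false
  let nums := loopB order 0 (List.replicate abs_times.length 0)
  let dens := List.replicate abs_times.length (4 : Int)
  if (nums.length : Int) ≠ N then
    let pad := PySem.List.pyGetD nums (-1) 0
    (PySem.List.slice nums none (some N) ++ List.replicate (N - nums.length).toNat pad,
     PySem.List.slice dens none (some N) ++ List.replicate (N - dens.length).toNat 4)
  else (nums, dens)

-- ===== PRECONDITION & SPEC =====
-- Pre_ excludes only the inputs where the Python A raises IndexError (empty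
-- abs_times with N ≠ 0 reaches nums[-1] on an empty list); B raises there too.
def Pre_make_meter_arrays (N : Int) (abs_times : List Int) : Prop := abs_times ≠ [] ∨ N = 0
instance (N : Int) (abs_times : List Int) : Decidable (Pre_make_meter_arrays N abs_times) := by unfold Pre_make_meter_arrays; infer_instance
def pvWitness_make_meter_arrays : Int × List Int := (3, [0, 30, 465])
def Spec_make_meter_arrays (N : Int) (abs_times : List Int) (out : List Int × List Int) : Prop := out = make_meter_arrays_alt N abs_times
instance (N : Int) (abs_times : List Int) (out : List Int × List Int) : Decidable (Spec_make_meter_arrays N abs_times out) := by unfold Spec_make_meter_arrays; infer_instance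

-- ===== CLAIM (what is proved, stated in full; the proofs are below) =====
def Claim_equal_make_meter_arrays : Prop := ∀ (N : Int) (abs_times : List Int), Dom_make_meter_arrays N abs_times → Pre_make_meter_arrays N abs_times → Spec_make_meter_arrays N abs_times (make_meter_arrays N abs_times)

-- ===== LEMMAS AND PROOFS =====

-- number of boundaries ≤ t (the slot index t falls into)
def pyBisectRight (xs : List Int) (t : Int) : Nat := (xs.takeWhile (fun b => b ≤ t)).length

-- the numerator of the slot of t
def numAt (t : Int) : Int := PySem.List.pyGetD metersNums (pyBisectRight metersBounds t : Int) 0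

lemma takeWhile_len_mono {α : Type} (xs : List α) (p q : α → Bool) (h : ∀ x, p x → q x) :
    (xs.takeWhile p).length ≤ (xs.takeWhile q).length := by
  induction xs with
  | nil => simp
  | cons x xs ih =>
    by_cases hp : p x
    · simp [hp, h x hp]; omega
    · simp [List.takeWhile_cons, hp]

lemma bisect_mono (t t' : Int) (h : t ≤ t') :
    pyBisectRight metersBounds t ≤ pyBisectRight metersBounds t' := by
  exact takeWhile_len_mono _ _ _ (fun x hx => by
    simp only [decide_eq_true_eq] at hx ⊢; omega)

lemma advance_from_le {α : Type} (xs : List α) (p : α → Bool) (j : Nat)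
    (hj : j ≤ (xs.takeWhile p).length) :
    j + ((xs.drop j).takeWhile p).length = (xs.takeWhile p).length := by
  induction xs generalizing j with
  | nil => simp at hj; simp [hj]
  | cons x xs ih =>
    cases j with
    | zero => simp
    | succ k =>
      by_cases hp : p x
      · simp only [List.takeWhile_cons, hp, if_true, List.length_cons] at hj ⊢
        have := ih k (by omega)
        simpa [List.drop_succ_cons] using by omega
      · simp [hp] at hj

lemma advanceJ_eq (j : Nat) (t : Int) (hj : j ≤ pyBisectRight metersBounds t) :
    advanceJ j t = pyBisectRight metersBounds t :=
  advance_from_le metersBounds _ j hj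

lemma loopB_eq (ps : List (Int × Int)) (j : Nat) (arr : List Int)
    (hps : ps.Pairwise (fun a b => a.2 ≤ b.2))
    (hj : ∀ p ∈ ps, j ≤ pyBisectRight metersBounds p.2) :
    loopB ps j arr = ps.foldl (fun a p => a.set p.1.toNat (numAt p.2)) arr := by
  induction ps generalizing j arr with
  | nil => simp [loopB]
  | cons p ps ih =>
    obtain ⟨i, t⟩ := p
    have hjt : advanceJ j t = pyBisectRight metersBounds t :=
      advanceJ_eq j t (hj (i, t) (by simp))
    simp only [loopB, hjt, List.foldl_cons]
    exact ih (pyBisectRight metersBounds t) _ hps.tail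
      (fun q hq => bisect_mono t q.2 (List.rel_of_pairwise_cons hps hq))

lemma setFold_getElem? (xs : List Int) (ps : List (Int × Int)) (arr : List Int)
    (harr : arr.length = xs.length)
    (h1 : ∀ p ∈ ps, ∃ (k : Nat) (h : k < xs.length), p = ((k : Int), xs[k]))
    (n : Nat) :
    (ps.foldl (fun a p => a.set p.1.toNat (numAt p.2)) arr)[n]? =
      if (n : Int) ∈ ps.map (fun p => p.1) then xs[n]?.map numAt else arr[n]? := by
  induction ps generalizing arr with
  | nil => simp
  | cons p ps ih =>
    obtain ⟨k, hk, hp⟩ := h1 p (by simp)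
    subst hp
    have harr' : (arr.set (k : Int).toNat (numAt xs[k])).length = xs.length := by simp [harr]
    rw [List.foldl_cons, ih _ harr' (fun q hq => h1 q (by simp [hq]))]
    by_cases hmem : (n : Int) ∈ ps.map (fun p => p.1)
    · simp [hmem]
    · by_cases hnk : n = k
      · subst hnk
        simp [hmem, List.getElem?_set_self (by omega : n < arr.length),
          List.getElem?_eq_getElem hk]
      · have hne : (n : Int) ≠ (k : Int) := by exact_mod_cast hnk
        simp [hmem, hne, List.getElem?_set_ne (show k ≠ n from fun h => hnk h.symm)]

lemma numsB_eq (xs : List Int) :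
    loopB (PySem.List.sorted (PySem.List.enumerate xs) (fun p => p.2) false) 0
        (List.replicate xs.length 0) = xs.map numAt := by
  set ps := PySem.List.sorted (PySem.List.enumerate xs) (fun p => p.2) false with hps
  have hmem : ∀ p, p ∈ ps ↔ p ∈ PySem.List.enumerate xs := fun p =>
    PySem.List.mem_sorted (PySem.List.enumerate xs) (fun p => p.2) false p
  have h1 : ∀ p ∈ ps, ∃ (k : Nat) (h : k < xs.length), p = ((k : Int), xs[k]) := by
    intro p hp
    rw [hmem] at hp
    rw [PySem.List.mem_enumerate_iff] at hp
    obtain ⟨k, hk, hpk⟩ := hp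
    exact ⟨k, hk, by simpa using hpk⟩
  rw [loopB_eq ps 0 _ (PySem.List.sorted_pairwise _ _) (fun p _ => Nat.zero_le _)]
  apply List.ext_getElem?
  intro n
  rw [setFold_getElem? xs ps _ (by simp) h1 n]
  by_cases hn : n < xs.length
  · have hmemn : (n : Int) ∈ ps.map (fun p => p.1) := by
      refine List.mem_map.mpr ⟨((n : Int), xs[n]), ?_, rfl⟩
      rw [hmem, PySem.List.mem_enumerate_iff]
      exact ⟨n, hn, by simp⟩
    simp [hmemn, List.getElem?_eq_getElem hn, List.getElem?_map]
  · have h1' : xs[n]? = none := by rw [List.getElem?_eq_none]; omega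
    have h2' : (xs.map numAt)[n]? = none := by rw [List.getElem?_eq_none]; simp; omega
    have h3' : (List.replicate xs.length (0:Int))[n]? = none := by
      rw [List.getElem?_eq_none]; simp; omega
    simp [h1', h2', h3']

lemma loopA (ts : List Int) (n d : List Int) :
    ts.foldl (fun (st : List Int × List Int) t =>
        (st.1 ++ [(meter_at_time t).1], st.2 ++ [(meter_at_time t).2])) (n, d)
      = (n ++ ts.map (fun t => (meter_at_time t).1),
         d ++ ts.map (fun t => (meter_at_time t).2)) := by
  induction ts generalizing n d with
  | nil => simp
  | cons t ts ih => simp [ih]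

lemma meter_eq (t : Int) :
    meter_at_time t = (numAt t, 4) := by
  unfold numAt
  by_cases h0 : t < 12
  · have hb : pyBisectRight metersBounds t = 0 := by
      simp [pyBisectRight, metersBounds, show ¬((12:Int) ≤ t) from by omega]
    simp [meter_at_time, hb, metersNums, h0]
  by_cases h1 : t < 20
  · have hb : pyBisectRight metersBounds t = 1 := by
      simp [pyBisectRight, metersBounds, show (12:Int) ≤ t from by omega, show ¬((20:Int) ≤ t) from by omega]
    simp [meter_at_time, hb, metersNums, h0, h1] <;> decide
  by_cases h2 : t < 36
  · have hb : pyBisectRight metersBounds t = 2 := by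
      simp [pyBisectRight, metersBounds, show (12:Int) ≤ t from by omega, show (20:Int) ≤ t from by omega, show ¬((36:Int) ≤ t) from by omega]
    simp [meter_at_time, hb, metersNums, h0, h1, h2] <;> decide
  by_cases h3 : t < 48
  · have hb : pyBisectRight metersBounds t = 3 := by
      simp [pyBisectRight, metersBounds, show (12:Int) ≤ t from by omega, show (20:Int) ≤ t from by omega, show (36:Int) ≤ t from by omega, show ¬((48:Int) ≤ t) from by omega]
    simp [meter_at_time, hb, metersNums, h0, h1, h2, h3] <;> decide
  by_cases h4 : t < 64
  · have hb : pyBisectRight metersBounds t = 4 := by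
      simp [pyBisectRight, metersBounds, show (12:Int) ≤ t from by omega, show (20:Int) ≤ t from by omega, show (36:Int) ≤ t from by omega, show (48:Int) ≤ t from by omega, show ¬((64:Int) ≤ t) from by omega]
    simp [meter_at_time, hb, metersNums, h0, h1, h2, h3, h4] <;> decide
  by_cases h5 : t < 80
  · have hb : pyBisectRight metersBounds t = 5 := by
      simp [pyBisectRight, metersBounds, show (12:Int) ≤ t from by omega, show (20:Int) ≤ t from by omega, show (36:Int) ≤ t from by omega, show (48:Int) ≤ t from by omega, show (64:Int) ≤ t from by omega, show ¬((80:Int) ≤ t) from by omega]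
    simp [meter_at_time, hb, metersNums, h0, h1, h2, h3, h4, h5] <;> decide
  by_cases h6 : t < 92
  · have hb : pyBisectRight metersBounds t = 6 := by
      simp [pyBisectRight, metersBounds, show (12:Int) ≤ t from by omega, show (20:Int) ≤ t from by omega, show (36:Int) ≤ t from by omega, show (48:Int) ≤ t from by omega, show (64:Int) ≤ t from by omega, show (80:Int) ≤ t from by omega, show ¬((92:Int) ≤ t) from by omega]
    simp [meter_at_time, hb, metersNums, h0, h1, h2, h3, h4, h5, h6] <;> decide
  by_cases h7 : t < 104
  · have hb : pyBisectRight metersBounds t = 7 := by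
      simp [pyBisectRight, metersBounds, show (12:Int) ≤ t from by omega, show (20:Int) ≤ t from by omega, show (36:Int) ≤ t from by omega, show (48:Int) ≤ t from by omega, show (64:Int) ≤ t from by omega, show (80:Int) ≤ t from by omega, show (92:Int) ≤ t from by omega, show ¬((104:Int) ≤ t) from by omega]
    simp [meter_at_time, hb, metersNums, h0, h1, h2, h3, h4, h5, h6, h7] <;> decide
  by_cases h8 : t < 116
  · have hb : pyBisectRight metersBounds t = 8 := by
      simp [pyBisectRight, metersBounds, show (12:Int) ≤ t from by omega, show (20:Int) ≤ t from by omega, show (36:Int) ≤ t from by omega, show (48:Int) ≤ t from by omega, show (64:Int) ≤ t from by omega, show (80:Int) ≤ t from by omega, show (92:Int) ≤ t from by omega, show (104:Int) ≤ t from by omega, show ¬((116:Int) ≤ t) from by omega]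
    simp [meter_at_time, hb, metersNums, h0, h1, h2, h3, h4, h5, h6, h7, h8] <;> decide
  by_cases h9 : t < 128
  · have hb : pyBisectRight metersBounds t = 9 := by
      simp [pyBisectRight, metersBounds, show (12:Int) ≤ t from by omega, show (20:Int) ≤ t from by omega, show (36:Int) ≤ t from by omega, show (48:Int) ≤ t from by omega, show (64:Int) ≤ t from by omega, show (80:Int) ≤ t from by omega, show (92:Int) ≤ t from by omega, show (104:Int) ≤ t from by omega, show (116:Int) ≤ t from by omega, show ¬((128:Int) ≤ t) from by omega]
    simp [meter_at_time, hb, metersNums, h0, h1, h2, h3, h4, h5, h6, h7, h8, h9] <;> decide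
  by_cases h10 : t < 140
  · have hb : pyBisectRight metersBounds t = 10 := by
      simp [pyBisectRight, metersBounds, show (12:Int) ≤ t from by omega, show (20:Int) ≤ t from by omega, show (36:Int) ≤ t from by omega, show (48:Int) ≤ t from by omega, show (64:Int) ≤ t from by omega, show (80:Int) ≤ t from by omega, show (92:Int) ≤ t from by omega, show (104:Int) ≤ t from by omega, show (116:Int) ≤ t from by omega, show (128:Int) ≤ t from by omega, show ¬((140:Int) ≤ t) from by omega]
    simp [meter_at_time, hb, metersNums, h0, h1, h2, h3, h4, h5, h6, h7, h8, h9, h10] <;> decide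
  by_cases h11 : t < 152
  · have hb : pyBisectRight metersBounds t = 11 := by
      simp [pyBisectRight, metersBounds, show (12:Int) ≤ t from by omega, show (20:Int) ≤ t from by omega, show (36:Int) ≤ t from by omega, show (48:Int) ≤ t from by omega, show (64:Int) ≤ t from by omega, show (80:Int) ≤ t from by omega, show (92:Int) ≤ t from by omega, show (104:Int) ≤ t from by omega, show (116:Int) ≤ t from by omega, show (128:Int) ≤ t from by omega, show (140:Int) ≤ t from by omega, show ¬((152:Int) ≤ t) from by omega]
    simp [meter_at_time, hb, metersNums, h0, h1, h2, h3, h4, h5, h6, h7, h8, h9, h10, h11] <;> decide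
  by_cases h12 : t < 164
  · have hb : pyBisectRight metersBounds t = 12 := by
      simp [pyBisectRight, metersBounds, show (12:Int) ≤ t from by omega, show (20:Int) ≤ t from by omega, show (36:Int) ≤ t from by omega, show (48:Int) ≤ t from by omega, show (64:Int) ≤ t from by omega, show (80:Int) ≤ t from by omega, show (92:Int) ≤ t from by omega, show (104:Int) ≤ t from by omega, show (116:Int) ≤ t from by omega, show (128:Int) ≤ t from by omega, show (140:Int) ≤ t from by omega, show (152:Int) ≤ t from by omega, show ¬((164:Int) ≤ t) from by omega]
    simp [meter_at_time, hb, metersNums, h0, h1, h2, h3, h4, h5, h6, h7, h8, h9, h10, h11, h12] <;> decide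
  by_cases h13 : t < 176
  · have hb : pyBisectRight metersBounds t = 13 := by
      simp [pyBisectRight, metersBounds, show (12:Int) ≤ t from by omega, show (20:Int) ≤ t from by omega, show (36:Int) ≤ t from by omega, show (48:Int) ≤ t from by omega, show (64:Int) ≤ t from by omega, show (80:Int) ≤ t from by omega, show (92:Int) ≤ t from by omega, show (104:Int) ≤ t from by omega, show (116:Int) ≤ t from by omega, show (128:Int) ≤ t from by omega, show (140:Int) ≤ t from by omega, show (152:Int) ≤ t from by omega, show (164:Int) ≤ t from by omega, show ¬((176:Int) ≤ t) from by omega]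
    simp [meter_at_time, hb, metersNums, h0, h1, h2, h3, h4, h5, h6, h7, h8, h9, h10, h11, h12, h13] <;> decide
  by_cases h14 : t < 184
  · have hb : pyBisectRight metersBounds t = 14 := by
      simp [pyBisectRight, metersBounds, show (12:Int) ≤ t from by omega, show (20:Int) ≤ t from by omega, show (36:Int) ≤ t from by omega, show (48:Int) ≤ t from by omega, show (64:Int) ≤ t from by omega, show (80:Int) ≤ t from by omega, show (92:Int) ≤ t from by omega, show (104:Int) ≤ t from by omega, show (116:Int) ≤ t from by omega, show (128:Int) ≤ t from by omega, show (140:Int) ≤ t from by omega, show (152:Int) ≤ t from by omega, show (164:Int) ≤ t from by omega, show (176:Int) ≤ t from by omega, show ¬((184:Int) ≤ t) from by omega]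
    simp [meter_at_time, hb, metersNums, h0, h1, h2, h3, h4, h5, h6, h7, h8, h9, h10, h11, h12, h13, h14] <;> decide
  by_cases h15 : t < 200
  · have hb : pyBisectRight metersBounds t = 15 := by
      simp [pyBisectRight, metersBounds, show (12:Int) ≤ t from by omega, show (20:Int) ≤ t from by omega, show (36:Int) ≤ t from by omega, show (48:Int) ≤ t from by omega, show (64:Int) ≤ t from by omega, show (80:Int) ≤ t from by omega, show (92:Int) ≤ t from by omega, show (104:Int) ≤ t from by omega, show (116:Int) ≤ t from by omega, show (128:Int) ≤ t from by omega, show (140:Int) ≤ t from by omega, show (152:Int) ≤ t from by omega, show (164:Int) ≤ t from by omega, show (176:Int) ≤ t from by omega, show (184:Int) ≤ t from by omega, show ¬((200:Int) ≤ t) from by omega]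
    simp [meter_at_time, hb, metersNums, h0, h1, h2, h3, h4, h5, h6, h7, h8, h9, h10, h11, h12, h13, h14, h15] <;> decide
  by_cases h16 : t < 216
  · have hb : pyBisectRight metersBounds t = 16 := by
      simp [pyBisectRight, metersBounds, show (12:Int) ≤ t from by omega, show (20:Int) ≤ t from by omega, show (36:Int) ≤ t from by omega, show (48:Int) ≤ t from by omega, show (64:Int) ≤ t from by omega, show (80:Int) ≤ t from by omega, show (92:Int) ≤ t from by omega, show (104:Int) ≤ t from by omega, show (116:Int) ≤ t from by omega, show (128:Int) ≤ t from by omega, show (140:Int) ≤ t from by omega, show (152:Int) ≤ t from by omega, show (164:Int) ≤ t from by omega, show (176:Int) ≤ t from by omega, show (184:Int) ≤ t from by omega, show (200:Int) ≤ t from by omega, show ¬((216:Int) ≤ t) from by omega]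
    simp [meter_at_time, hb, metersNums, h0, h1, h2, h3, h4, h5, h6, h7, h8, h9, h10, h11, h12, h13, h14, h15, h16] <;> decide
  by_cases h17 : t < 232
  · have hb : pyBisectRight metersBounds t = 17 := by
      simp [pyBisectRight, metersBounds, show (12:Int) ≤ t from by omega, show (20:Int) ≤ t from by omega, show (36:Int) ≤ t from by omega, show (48:Int) ≤ t from by omega, show (64:Int) ≤ t from by omega, show (80:Int) ≤ t from by omega, show (92:Int) ≤ t from by omega, show (104:Int) ≤ t from by omega, show (116:Int) ≤ t from by omega, show (128:Int) ≤ t from by omega, show (140:Int) ≤ t from by omega, show (152:Int) ≤ t from by omega, show (164:Int) ≤ t from by omega, show (176:Int) ≤ t from by omega, show (184:Int) ≤ t from by omega, show (200:Int) ≤ t from by omega, show (216:Int) ≤ t from by omega, show ¬((232:Int) ≤ t) from by omega]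
    simp [meter_at_time, hb, metersNums, h0, h1, h2, h3, h4, h5, h6, h7, h8, h9, h10, h11, h12, h13, h14, h15, h16, h17] <;> decide
  by_cases h18 : t < 236
  · have hb : pyBisectRight metersBounds t = 18 := by
      simp [pyBisectRight, metersBounds, show (12:Int) ≤ t from by omega, show (20:Int) ≤ t from by omega, show (36:Int) ≤ t from by omega, show (48:Int) ≤ t from by omega, show (64:Int) ≤ t from by omega, show (80:Int) ≤ t from by omega, show (92:Int) ≤ t from by omega, show (104:Int) ≤ t from by omega, show (116:Int) ≤ t from by omega, show (128:Int) ≤ t from by omega, show (140:Int) ≤ t from by omega, show (152:Int) ≤ t from by omega, show (164:Int) ≤ t from by omega, show (176:Int) ≤ t from by omega, show (184:Int) ≤ t from by omega, show (200:Int) ≤ t from by omega, show (216:Int) ≤ t from by omega, show (232:Int) ≤ t from by omega, show ¬((236:Int) ≤ t) from by omega]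
    simp [meter_at_time, hb, metersNums, h0, h1, h2, h3, h4, h5, h6, h7, h8, h9, h10, h11, h12, h13, h14, h15, h16, h17, h18] <;> decide
  by_cases h19 : t < 240
  · have hb : pyBisectRight metersBounds t = 19 := by
      simp [pyBisectRight, metersBounds, show (12:Int) ≤ t from by omega, show (20:Int) ≤ t from by omega, show (36:Int) ≤ t from by omega, show (48:Int) ≤ t from by omega, show (64:Int) ≤ t from by omega, show (80:Int) ≤ t from by omega, show (92:Int) ≤ t from by omega, show (104:Int) ≤ t from by omega, show (116:Int) ≤ t from by omega, show (128:Int) ≤ t from by omega, show (140:Int) ≤ t from by omega, show (152:Int) ≤ t from by omega, show (164:Int) ≤ t from by omega, show (176:Int) ≤ t from by omega, show (184:Int) ≤ t from by omega, show (200:Int) ≤ t from by omega, show (216:Int) ≤ t from by omega, show (232:Int) ≤ t from by omega, show (236:Int) ≤ t from by omega, show ¬((240:Int) ≤ t) from by omega]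
    simp [meter_at_time, hb, metersNums, h0, h1, h2, h3, h4, h5, h6, h7, h8, h9, h10, h11, h12, h13, h14, h15, h16, h17, h18, h19] <;> decide
  by_cases h20 : t < 256
  · have hb : pyBisectRight metersBounds t = 20 := by
      simp [pyBisectRight, metersBounds, show (12:Int) ≤ t from by omega, show (20:Int) ≤ t from by omega, show (36:Int) ≤ t from by omega, show (48:Int) ≤ t from by omega, show (64:Int) ≤ t from by omega, show (80:Int) ≤ t from by omega, show (92:Int) ≤ t from by omega, show (104:Int) ≤ t from by omega, show (116:Int) ≤ t from by omega, show (128:Int) ≤ t from by omega, show (140:Int) ≤ t from by omega, show (152:Int) ≤ t from by omega, show (164:Int) ≤ t from by omega, show (176:Int) ≤ t from by omega, show (184:Int) ≤ t from by omega, show (200:Int) ≤ t from by omega, show (216:Int) ≤ t from by omega, show (232:Int) ≤ t from by omega, show (236:Int) ≤ t from by omega, show (240:Int) ≤ t from by omega, show ¬((256:Int) ≤ t) from by omega]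
    simp [meter_at_time, hb, metersNums, h0, h1, h2, h3, h4, h5, h6, h7, h8, h9, h10, h11, h12, h13, h14, h15, h16, h17, h18, h19, h20] <;> decide
  by_cases h21 : t < 272
  · have hb : pyBisectRight metersBounds t = 21 := by
      simp [pyBisectRight, metersBounds, show (12:Int) ≤ t from by omega, show (20:Int) ≤ t from by omega, show (36:Int) ≤ t from by omega, show (48:Int) ≤ t from by omega, show (64:Int) ≤ t from by omega, show (80:Int) ≤ t from by omega, show (92:Int) ≤ t from by omega, show (104:Int) ≤ t from by omega, show (116:Int) ≤ t from by omega, show (128:Int) ≤ t from by omega, show (140:Int) ≤ t from by omega, show (152:Int) ≤ t from by omega, show (164:Int) ≤ t from by omega, show (176:Int) ≤ t from by omega, show (184:Int) ≤ t from by omega, show (200:Int) ≤ t from by omega, show (216:Int) ≤ t from by omega, show (232:Int) ≤ t from by omega, show (236:Int) ≤ t from by omega, show (240:Int) ≤ t from by omega, show (256:Int) ≤ t from by omega, show ¬((272:Int) ≤ t) from by omega]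
    simp [meter_at_time, hb, metersNums, h0, h1, h2, h3, h4, h5, h6, h7, h8, h9, h10, h11, h12, h13, h14, h15, h16, h17, h18, h19, h20, h21] <;> decide
  by_cases h22 : t < 288
  · have hb : pyBisectRight metersBounds t = 22 := by
      simp [pyBisectRight, metersBounds, show (12:Int) ≤ t from by omega, show (20:Int) ≤ t from by omega, show (36:Int) ≤ t from by omega, show (48:Int) ≤ t from by omega, show (64:Int) ≤ t from by omega, show (80:Int) ≤ t from by omega, show (92:Int) ≤ t from by omega, show (104:Int) ≤ t from by omega, show (116:Int) ≤ t from by omega, show (128:Int) ≤ t from by omega, show (140:Int) ≤ t from by omega, show (152:Int) ≤ t from by omega, show (164:Int) ≤ t from by omega, show (176:Int) ≤ t from by omega, show (184:Int) ≤ t from by omega, show (200:Int) ≤ t from by omega, show (216:Int) ≤ t from by omega, show (232:Int) ≤ t from by omega, show (236:Int) ≤ t from by omega, show (240:Int) ≤ t from by omega, show (256:Int) ≤ t from by omega, show (272:Int) ≤ t from by omega, show ¬((288:Int) ≤ t) from by omega]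
    simp [meter_at_time, hb, metersNums, h0, h1, h2, h3, h4, h5, h6, h7, h8, h9, h10, h11, h12, h13, h14, h15, h16, h17, h18, h19, h20, h21, h22] <;> decide
  by_cases h23 : t < 304
  · have hb : pyBisectRight metersBounds t = 23 := by
      simp [pyBisectRight, metersBounds, show (12:Int) ≤ t from by omega, show (20:Int) ≤ t from by omega, show (36:Int) ≤ t from by omega, show (48:Int) ≤ t from by omega, show (64:Int) ≤ t from by omega, show (80:Int) ≤ t from by omega, show (92:Int) ≤ t from by omega, show (104:Int) ≤ t from by omega, show (116:Int) ≤ t from by omega, show (128:Int) ≤ t from by omega, show (140:Int) ≤ t from by omega, show (152:Int) ≤ t from by omega, show (164:Int) ≤ t from by omega, show (176:Int) ≤ t from by omega, show (184:Int) ≤ t from by omega, show (200:Int) ≤ t from by omega, show (216:Int) ≤ t from by omega, show (232:Int) ≤ t from by omega, show (236:Int) ≤ t from by omega, show (240:Int) ≤ t from by omega, show (256:Int) ≤ t from by omega, show (272:Int) ≤ t from by omega, show (288:Int) ≤ t from by omega, show ¬((304:Int) ≤ t) from by omega]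
    simp [meter_at_time, hb, metersNums, h0, h1, h2, h3, h4, h5, h6, h7, h8, h9, h10, h11, h12, h13, h14, h15, h16, h17, h18, h19, h20, h21, h22, h23] <;> decide
  by_cases h24 : t < 320
  · have hb : pyBisectRight metersBounds t = 24 := by
      simp [pyBisectRight, metersBounds, show (12:Int) ≤ t from by omega, show (20:Int) ≤ t from by omega, show (36:Int) ≤ t from by omega, show (48:Int) ≤ t from by omega, show (64:Int) ≤ t from by omega, show (80:Int) ≤ t from by omega, show (92:Int) ≤ t from by omega, show (104:Int) ≤ t from by omega, show (116:Int) ≤ t from by omega, show (128:Int) ≤ t from by omega, show (140:Int) ≤ t from by omega, show (152:Int) ≤ t from by omega, show (164:Int) ≤ t from by omega, show (176:Int) ≤ t from by omega, show (184:Int) ≤ t from by omega, show (200:Int) ≤ t from by omega, show (216:Int) ≤ t from by omega, show (232:Int) ≤ t from by omega, show (236:Int) ≤ t from by omega, show (240:Int) ≤ t from by omega, show (256:Int) ≤ t from by omega, show (272:Int) ≤ t from by omega, show (288:Int) ≤ t from by omega, show (304:Int) ≤ t from by omega, show ¬((320:Int) ≤ t) from by omega]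
    simp [meter_at_time, hb, metersNums, h0, h1, h2, h3, h4, h5, h6, h7, h8, h9, h10, h11, h12, h13, h14, h15, h16, h17, h18, h19, h20, h21, h22, h23, h24] <;> decide
  by_cases h25 : t < 336
  · have hb : pyBisectRight metersBounds t = 25 := by
      simp [pyBisectRight, metersBounds, show (12:Int) ≤ t from by omega, show (20:Int) ≤ t from by omega, show (36:Int) ≤ t from by omega, show (48:Int) ≤ t from by omega, show (64:Int) ≤ t from by omega, show (80:Int) ≤ t from by omega, show (92:Int) ≤ t from by omega, show (104:Int) ≤ t from by omega, show (116:Int) ≤ t from by omega, show (128:Int) ≤ t from by omega, show (140:Int) ≤ t from by omega, show (152:Int) ≤ t from by omega, show (164:Int) ≤ t from by omega, show (176:Int) ≤ t from by omega, show (184:Int) ≤ t from by omega, show (200:Int) ≤ t from by omega, show (216:Int) ≤ t from by omega, show (232:Int) ≤ t from by omega, show (236:Int) ≤ t from by omega, show (240:Int) ≤ t from by omega, show (256:Int) ≤ t from by omega, show (272:Int) ≤ t from by omega, show (288:Int) ≤ t from by omega, show (304:Int) ≤ t from by omega, show (320:Int) ≤ t from by omega, show ¬((336:Int) ≤ t)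 from by omega]
    simp [meter_at_time, hb, metersNums, h0, h1, h2, h3, h4, h5, h6, h7, h8, h9, h10, h11, h12, h13, h14, h15, h16, h17, h18, h19, h20, h21, h22, h23, h24, h25] <;> decide
  by_cases h26 : t < 352
  · have hb : pyBisectRight metersBounds t = 26 := by
      simp [pyBisectRight, metersBounds, show (12:Int) ≤ t from by omega, show (20:Int) ≤ t from by omega, show (36:Int) ≤ t from by omega, show (48:Int) ≤ t from by omega, show (64:Int) ≤ t from by omega, show (80:Int) ≤ t from by omega, show (92:Int) ≤ t from by omega, show (104:Int) ≤ t from by omega, show (116:Int) ≤ t from by omega, show (128:Int) ≤ t from by omega, show (140:Int) ≤ t from by omega, show (152:Int) ≤ t from by omega, show (164:Int) ≤ t from by omega, show (176:Int) ≤ t from by omega, show (184:Int) ≤ t from by omega, show (200:Int) ≤ t from by omega, show (216:Int) ≤ t from by omega, show (232:Int) ≤ t from by omega, show (236:Int) ≤ t from by omega, show (240:Int) ≤ t from by omega, show (256:Int) ≤ t from by omega, show (272:Int) ≤ t from by omega, show (288:Int) ≤ t from by omega, show (304:Int) ≤ t from by omega, show (320:Int) ≤ t from by omega, show (336:Int)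 ≤ t from by omega, show ¬((352:Int) ≤ t) from by omega]
    simp [meter_at_time, hb, metersNums, h0, h1, h2, h3, h4, h5, h6, h7, h8, h9, h10, h11, h12, h13, h14, h15, h16, h17, h18, h19, h20, h21, h22, h23, h24, h25, h26] <;> decide
  by_cases h27 : t < 368
  · have hb : pyBisectRight metersBounds t = 27 := by
      simp [pyBisectRight, metersBounds, show (12:Int) ≤ t from by omega, show (20:Int) ≤ t from by omega, show (36:Int) ≤ t from by omega, show (48:Int) ≤ t from by omega, show (64:Int) ≤ t from by omega, show (80:Int) ≤ t from by omega, show (92:Int) ≤ t from by omega, show (104:Int) ≤ t from by omega, show (116:Int) ≤ t from by omega, show (128:Int) ≤ t from by omega, show (140:Int) ≤ t from by omega, show (152:Int) ≤ t from by omega, show (164:Int) ≤ t from by omega, show (176:Int) ≤ t from by omega, show (184:Int) ≤ t from by omega, show (200:Int) ≤ t from by omega, show (216:Int) ≤ t from by omega, show (232:Int) ≤ t from by omega, show (236:Int) ≤ t from by omega, show (240:Int) ≤ t from by omega, show (256:Int) ≤ t from by omega, show (272:Int) ≤ t from by omega, show (288:Int) ≤ t from by omega, show (304:Int) ≤ t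 from by omega, show (320:Int) ≤ t from by omega, show (336:Int) ≤ t from by omega, show (352:Int) ≤ t from by omega, show ¬((368:Int) ≤ t) from by omega]
    simp [meter_at_time, hb, metersNums, h0, h1, h2, h3, h4, h5, h6, h7, h8, h9, h10, h11, h12, h13, h14, h15, h16, h17, h18, h19, h20, h21, h22, h23, h24, h25, h26, h27] <;> decide
  by_cases h28 : t < 384
  · have hb : pyBisectRight metersBounds t = 28 := by
      simp [pyBisectRight, metersBounds, show (12:Int) ≤ t from by omega, show (20:Int) ≤ t from by omega, show (36:Int) ≤ t from by omega, show (48:Int) ≤ t from by omega, show (64:Int) ≤ t from by omega, show (80:Int) ≤ t from by omega, show (92:Int) ≤ t from by omega, show (104:Int) ≤ t from by omega, show (116:Int) ≤ t from by omega, show (128:Int) ≤ t from by omega, show (140:Int) ≤ t from by omega, show (152:Int) ≤ t from by omega, show (164:Int) ≤ t from by omega, show (176:Int) ≤ t from by omega, show (184:Int) ≤ t from by omega, show (200:Int) ≤ t from by omega, show (216:Int) ≤ t from by omega, show (232:Int) ≤ t from by omega, show (236:Int) ≤ t from by omega, show (240:Int) ≤ t from by omega, show (256:Int) ≤ t from by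 omega, show (272:Int) ≤ t from by omega, show (288:Int) ≤ t from by omega, show (304:Int) ≤ t from by omega, show (320:Int) ≤ t from by omega, show (336:Int) ≤ t from by omega, show (352:Int) ≤ t from by omega, show (368:Int) ≤ t from by omega, show ¬((384:Int) ≤ t) from by omega]
    simp [meter_at_time, hb, metersNums, h0, h1, h2, h3, h4, h5, h6, h7, h8, h9, h10, h11, h12, h13, h14, h15, h16, h17, h18, h19, h20, h21, h22, h23, h24, h25, h26, h27, h28] <;> decide
  by_cases h29 : t < 400
  · have hb : pyBisectRight metersBounds t = 29 := by
      simp [pyBisectRight, metersBounds, show (12:Int) ≤ t from by omega, show (20:Int) ≤ t from by omega, show (36:Int) ≤ t from by omega, show (48:Int) ≤ t from by omega, show (64:Int) ≤ t from by omega, show (80:Int) ≤ t from by omega, show (92:Int) ≤ t from by omega, show (104:Int) ≤ t from by omega, show (116:Int) ≤ t from by omega, show (128:Int) ≤ t from by omega, show (140:Int) ≤ t from by omega, show (152:Int) ≤ t from by omega, show (164:Int) ≤ t from by omega, show (176:Int) ≤ t from by omega, show (184:Int) ≤ t from by omega, show (200:Int) ≤ t from by omega, show (216:Int) ≤ t from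 by omega, show (232:Int) ≤ t from by omega, show (236:Int) ≤ t from by omega, show (240:Int) ≤ t from by omega, show (256:Int) ≤ t from by omega, show (272:Int) ≤ t from by omega, show (288:Int) ≤ t from by omega, show (304:Int) ≤ t from by omega, show (320:Int) ≤ t from by omega, show (336:Int) ≤ t from by omega, show (352:Int) ≤ t from by omega, show (368:Int) ≤ t from by omega, show (384:Int) ≤ t from by omega, show ¬((400:Int) ≤ t) from by omega]
    simp [meter_at_time, hb, metersNums, h0, h1, h2, h3, h4, h5, h6, h7, h8, h9, h10, h11, h12, h13, h14, h15, h16, h17, h18, h19, h20, h21, h22, h23, h24, h25, h26, h27, h28, h29] <;> decide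
  by_cases h30 : t < 416
  · have hb : pyBisectRight metersBounds t = 30 := by
      simp [pyBisectRight, metersBounds, show (12:Int) ≤ t from by omega, show (20:Int) ≤ t from by omega, show (36:Int) ≤ t from by omega, show (48:Int) ≤ t from by omega, show (64:Int) ≤ t from by omega, show (80:Int) ≤ t from by omega, show (92:Int) ≤ t from by omega, show (104:Int) ≤ t from by omega, show (116:Int) ≤ t from by omega, show (128:Int) ≤ t from by omega, show (140:Int) ≤ t from by omega, show (152:Int) ≤ t from by omega, show (164:Int) ≤ t from by omega, show (176:Int) ≤ t from by omega, show (184:Int) ≤ t from by omega, show (200:Int) ≤ t from by omega, show (216:Int) ≤ t from by omega, show (232:Int) ≤ t from by omega, show (236:Int) ≤ t from by omega, show (240:Int) ≤ t from by omega, show (256:Int) ≤ t from by omega, show (272:Int) ≤ t from by omega, show (288:Int) ≤ t from by omega, show (304:Int) ≤ t from by omega, show (320:Int) ≤ t from by omega, show (336:Int) ≤ t from by omega, show (352:Int) ≤ t from by omega, show (368:Int) ≤ t from by omega, show (384:Int) ≤ t from by omega, show (400:Int) ≤ t from by omega, show ¬((416:Int) ≤ t) from by omega]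
    simp [meter_at_time, hb, metersNums, h0, h1, h2, h3, h4, h5, h6, h7, h8, h9, h10, h11, h12, h13, h14, h15, h16, h17, h18, h19, h20, h21, h22, h23, h24, h25, h26, h27, h28, h29, h30] <;> decide
  by_cases h31 : t < 432
  · have hb : pyBisectRight metersBounds t = 31 := by
      simp [pyBisectRight, metersBounds, show (12:Int) ≤ t from by omega, show (20:Int) ≤ t from by omega, show (36:Int) ≤ t from by omega, show (48:Int) ≤ t from by omega, show (64:Int) ≤ t from by omega, show (80:Int) ≤ t from by omega, show (92:Int) ≤ t from by omega, show (104:Int) ≤ t from by omega, show (116:Int) ≤ t from by omega, show (128:Int) ≤ t from by omega, show (140:Int) ≤ t from by omega, show (152:Int) ≤ t from by omega, show (164:Int) ≤ t from by omega, show (176:Int) ≤ t from by omega, show (184:Int) ≤ t from by omega, show (200:Int) ≤ t from by omega, show (216:Int) ≤ t from by omega, show (232:Int) ≤ t from by omega, show (236:Int) ≤ t from by omega, show (240:Int) ≤ t from by omega, show (256:Int) ≤ t from by omega, show (272:Int) ≤ t from by omega, show (288:Int) ≤ t from by omega, show (304:Int) ≤ t from by omega, show (320:Int) ≤ t from by omega,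 show (336:Int) ≤ t from by omega, show (352:Int) ≤ t from by omega, show (368:Int) ≤ t from by omega, show (384:Int) ≤ t from by omega, show (400:Int) ≤ t from by omega, show (416:Int) ≤ t from by omega, show ¬((432:Int) ≤ t) from by omega]
    simp [meter_at_time, hb, metersNums, h0, h1, h2, h3, h4, h5, h6, h7, h8, h9, h10, h11, h12, h13, h14, h15, h16, h17, h18, h19, h20, h21, h22, h23, h24, h25, h26, h27, h28, h29, h30, h31] <;> decide
  by_cases h32 : t < 448
  · have hb : pyBisectRight metersBounds t = 32 := by
      simp [pyBisectRight, metersBounds, show (12:Int) ≤ t from by omega, show (20:Int) ≤ t from by omega, show (36:Int) ≤ t from by omega, show (48:Int) ≤ t from by omega, show (64:Int) ≤ t from by omega, show (80:Int) ≤ t from by omega, show (92:Int) ≤ t from by omega, show (104:Int) ≤ t from by omega, show (116:Int) ≤ t from by omega, show (128:Int) ≤ t from by omega, show (140:Int) ≤ t from by omega, show (152:Int) ≤ t from by omega, show (164:Int) ≤ t from by omega, show (176:Int) ≤ t from by omega, show (184:Int) ≤ t from by omega, show (200:Int) ≤ t from by omega, show (216:Int) ≤ t from by omega, show (232:Int)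 ≤ t from by omega, show (236:Int) ≤ t from by omega, show (240:Int) ≤ t from by omega, show (256:Int) ≤ t from by omega, show (272:Int) ≤ t from by omega, show (288:Int) ≤ t from by omega, show (304:Int) ≤ t from by omega, show (320:Int) ≤ t from by omega, show (336:Int) ≤ t from by omega, show (352:Int) ≤ t from by omega, show (368:Int) ≤ t from by omega, show (384:Int) ≤ t from by omega, show (400:Int) ≤ t from by omega, show (416:Int) ≤ t from by omega, show (432:Int) ≤ t from by omega, show ¬((448:Int) ≤ t) from by omega]
    simp [meter_at_time, hb, metersNums, h0, h1, h2, h3, h4, h5, h6, h7, h8, h9, h10, h11, h12, h13, h14, h15, h16, h17, h18, h19, h20, h21, h22, h23, h24, h25, h26, h27, h28, h29, h30, h31, h32] <;> decide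
  by_cases h33 : t < 464
  · have hb : pyBisectRight metersBounds t = 33 := by
      simp [pyBisectRight, metersBounds, show (12:Int) ≤ t from by omega, show (20:Int) ≤ t from by omega, show (36:Int) ≤ t from by omega, show (48:Int) ≤ t from by omega, show (64:Int) ≤ t from by omega, show (80:Int) ≤ t from by omega, show (92:Int) ≤ t from by omega, show (104:Int) ≤ t from by omega, show (116:Int) ≤ t from by omega, show (128:Int) ≤ t from by omega, show (140:Int) ≤ t from by omega, show (152:Int) ≤ t from by omega, show (164:Int) ≤ t from by omega, show (176:Int) ≤ t from by omega, show (184:Int) ≤ t from by omega, show (200:Int) ≤ t from by omega, show (216:Int) ≤ t from by omega, show (232:Int) ≤ t from by omega, show (236:Int) ≤ t from by omega, show (240:Int) ≤ t from by omega, show (256:Int) ≤ t from by omega, show (272:Int) ≤ t from by omega, show (288:Int) ≤ t from by omega, show (304:Int) ≤ t from by omega, show (320:Int) ≤ t from by omega, show (336:Int) ≤ t from by omega, show (352:Int) ≤ t from by omega, show (368:Int) ≤ t from by omega, show (384:Int) ≤ t from by omega, show (400:Int) ≤ t from by omega, show (416:Int) ≤ t from by omega, show (432:Int) ≤ t from by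 omega, show (448:Int) ≤ t from by omega, show ¬((464:Int) ≤ t) from by omega]
    simp [meter_at_time, hb, metersNums, h0, h1, h2, h3, h4, h5, h6, h7, h8, h9, h10, h11, h12, h13, h14, h15, h16, h17, h18, h19, h20, h21, h22, h23, h24, h25, h26, h27, h28, h29, h30, h31, h32, h33] <;> decide
  have hb : pyBisectRight metersBounds t = 34 := by
    simp [pyBisectRight, metersBounds, show (12:Int) ≤ t from by omega, show (20:Int) ≤ t from by omega, show (36:Int) ≤ t from by omega, show (48:Int) ≤ t from by omega, show (64:Int) ≤ t from by omega, show (80:Int) ≤ t from by omega, show (92:Int) ≤ t from by omega, show (104:Int) ≤ t from by omega, show (116:Int) ≤ t from by omega, show (128:Int) ≤ t from by omega, show (140:Int) ≤ t from by omega, show (152:Int) ≤ t from by omega, show (164:Int) ≤ t from by omega, show (176:Int) ≤ t from by omega, show (184:Int) ≤ t from by omega, show (200:Int) ≤ t from by omega, show (216:Int) ≤ t from by omega, show (232:Int) ≤ t from by omega, show (236:Int) ≤ t from by omega, show (240:Int) ≤ t from by omega, show (256:Int) ≤ t from by omega, show (272:Int) ≤ t from by omega, show (288:Int) ≤ t from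 by omega, show (304:Int) ≤ t from by omega, show (320:Int) ≤ t from by omega, show (336:Int) ≤ t from by omega, show (352:Int) ≤ t from by omega, show (368:Int) ≤ t from by omega, show (384:Int) ≤ t from by omega, show (400:Int) ≤ t from by omega, show (416:Int) ≤ t from by omega, show (432:Int) ≤ t from by omega, show (448:Int) ≤ t from by omega, show (464:Int) ≤ t from by omega]
  simp [meter_at_time, hb, metersNums, h0, h1, h2, h3, h4, h5, h6, h7, h8, h9, h10, h11, h12, h13, h14, h15, h16, h17, h18, h19, h20, h21, h22, h23, h24, h25, h26, h27, h28, h29, h30, h31, h32, h33] <;> decide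

lemma numsA_eq (ts : List Int) :
    ts.map (fun t => (meter_at_time t).1) = ts.map numAt := by
  refine List.map_congr_left (fun t _ => ?_)
  rw [meter_eq]

lemma densA_eq (ts : List Int) :
    ts.map (fun t => (meter_at_time t).2) = List.replicate ts.length (4 : Int) := by
  induction ts with
  | nil => rfl
  | cons t ts ih => simp [ih, meter_eq t, List.replicate_succ]

lemma pad_slice_eq (u : List Int) (x : Int) (N : Int) :
    PySem.List.slice (u ++ List.replicate N.toNat x) none (some N)
      = PySem.List.slice u none (some N) ++ List.replicate (N - u.length).toNat x := by
  by_cases hN : N ≤ 0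
  · have h1 : N.toNat = 0 := Int.toNat_of_nonpos hN
    have h2 : (N - u.length).toNat = 0 := Int.toNat_of_nonpos (by omega)
    simp [h1, h2]
  · push_neg at hN
    rw [PySem.List.slice_to _ (le_of_lt hN), PySem.List.slice_to _ (le_of_lt hN)]
    by_cases hle : N.toNat ≤ u.length
    · have h2 : (N - u.length).toNat = 0 := Int.toNat_of_nonpos (by omega)
      simp [h2, List.take_append_of_le_length hle]
    · push_neg at hle
      have h2 : (N - u.length).toNat = N.toNat - u.length := by omega
      rw [List.take_append, List.take_of_length_le (by omega), List.take_replicate, h2]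
      congr 1
      congr 1
      omega

-- ===== VERDICT (by name: the statement is the Claim_ definition above) =====
theorem make_meter_arrays_spec : Claim_equal_make_meter_arrays := by
  intro N ts _ _
  unfold Spec_make_meter_arrays make_meter_arrays make_meter_arrays_alt
  simp only [loopA, List.nil_append, numsA_eq, densA_eq, numsB_eq, List.length_map,
    List.length_replicate]
  by_cases h : ((ts.map numAt).length : Int) ≠ N
  · simp only [List.length_map] at h
    simp only [h, if_true, ne_eq, not_false_iff]
    rw [pad_slice_eq, pad_slice_eq]
    simp
  · simp only [List.length_map] at h
    simp [h]
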